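-- pv_equiv track=rewrite | github.com/bast/head-project | debug.py | filter_problem_triangles
-- ===== SOURCE A (Python) =====
-- from collections import defaultdict
--
-- def cycle(i, j, k):
--     return [tuple(sorted([i, j])), tuple(sorted([j, k])), tuple(sorted([k, i]))]
--
-- def filter_problem_triangles(vertices):
--     d = defaultdict(int)
--     edge_to_triangles = defaultdict(list)
--
--     all_triangles = set()
--     for i, j, k in vertices:
--         ijk = tuple(sorted([i, j, k]))
--         all_triangles.add(ijk)
--         for ij in cycle(i, j, k):
--             d[ij] += 1
--             edge_to_triangles[ij].append(ijk)
--
--     problem_triangles = set()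
--     for k, v in d.items():
--         if v > 2:
--             for triangle in edge_to_triangles[k]:
--                 problem_triangles.add(triangle)
--
--     # set of triangles that are not problem triangles
--     good_triangles = all_triangles - problem_triangles
--
--     return list(good_triangles)
-- ===== SOURCE B (Python) =====
-- from collections import defaultdict
--
-- def cycle(i, j, k):
--     return [tuple(sorted([i, j])), tuple(sorted([j, k])), tuple(sorted([k, i]))]
--
-- def filter_problem_triangles(vertices):
--     d = defaultdict(int)
--     all_triangles = set()
--     for i, j, k in vertices:
--         all_triangles.add(tuple(sorted([i, j, k])))
--         for edge in cycle(i, j, k):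
--             d[edge] += 1
--     problem_triangles = {t for t in all_triangles
--                          if any(d[edge] > 2 for edge in cycle(*t))}
--     return list(all_triangles - problem_triangles)
-- ===== Notes on version B (the rewrite author's own statement) =====
-- stated objective: simpler
-- what changed: Drops the edge_to_triangles inverted index entirely; instead of collecting triangles edge-by-edge from that index, the problem set is a direct comprehension testing each distinct triangle's three edges against the shared edge-count dict, and the result is the same set difference.
import Mathlib
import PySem

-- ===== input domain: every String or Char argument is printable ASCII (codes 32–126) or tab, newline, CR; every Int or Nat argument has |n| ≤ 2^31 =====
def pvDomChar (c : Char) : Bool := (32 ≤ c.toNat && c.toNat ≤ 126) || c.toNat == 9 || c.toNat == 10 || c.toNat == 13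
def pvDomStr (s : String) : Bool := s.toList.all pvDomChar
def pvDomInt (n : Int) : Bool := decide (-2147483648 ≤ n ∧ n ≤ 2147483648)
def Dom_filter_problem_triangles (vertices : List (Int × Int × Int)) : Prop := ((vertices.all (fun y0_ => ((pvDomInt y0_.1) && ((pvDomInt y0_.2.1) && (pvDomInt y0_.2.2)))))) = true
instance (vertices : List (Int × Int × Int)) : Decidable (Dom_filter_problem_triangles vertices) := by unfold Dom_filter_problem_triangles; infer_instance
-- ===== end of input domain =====

-- B drops A's edge_to_triangles inverted index and finds the problem triangles by testing each
-- distinct triangle's three edges against the shared edge-count dict (objective: simpler).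
-- Python's list(set) iteration order is hash-based and not modelled; both ports return the
-- set difference in first-insertion order, identically on both sides.

-- ===== PORT A =====
-- helper cycle(i, j, k); tuple(sorted([i, j])) transliterated via PySem.List.sorted
def pySortPair (i j : Int) : Int × Int :=
  match PySem.List.sorted [i, j] (fun x => x) with
  | [a, b] => (a, b)
  | _ => (i, j)

def pyCycle (i j k : Int) : List (Int × Int) :=
  [pySortPair i j, pySortPair j k, pySortPair k i]

-- tuple(sorted([i, j, k]))
def pySort3 (i j k : Int) : Int × Int × Int :=
  match PySem.List.sorted [i, j, k] (fun x => x) with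
  | [a, b, c] => (a, b, c)
  | _ => (i, j, k)

-- the body of A's first loop: updates (d, edge_to_triangles, all_triangles)
def pvStepA
    (st : PySem.Dict (Int × Int) Int × PySem.Dict (Int × Int) (List (Int × Int × Int)) × PySem.Set (Int × Int × Int))
    (v : Int × Int × Int) :
    PySem.Dict (Int × Int) Int × PySem.Dict (Int × Int) (List (Int × Int × Int)) × PySem.Set (Int × Int × Int) :=
  let ijk := pySort3 v.1 v.2.1 v.2.2
  let allT := PySem.Set.add st.2.2 ijk
  let de := (pyCycle v.1 v.2.1 v.2.2).foldl
      (fun de e => (de.1.modify e 0 (· + 1), de.2.modify e [] (fun l => l ++ [ijk])))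
      (st.1, st.2.1)
  (de.1, de.2, allT)

def filter_problem_triangles (vertices : List (Int × Int × Int)) : List (Int × Int × Int) :=
  let st := vertices.foldl pvStepA (PySem.Dict.empty, PySem.Dict.empty, PySem.Set.empty)
  let problem := st.1.items.foldl
      (fun pb kv => if kv.2 > 2 then (st.2.1.getD kv.1 []).foldl (fun pb t => pb.add t) pb else pb)
      PySem.Set.empty
  PySem.Set.diff st.2.2 problem

-- ===== PORT B =====
-- body of B's first loop: only (d, all_triangles)
def pvStepB
    (st : PySem.Dict (Int × Int) Int × PySem.Set (Int × Int × Int))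
    (v : Int × Int × Int) :
    PySem.Dict (Int × Int) Int × PySem.Set (Int × Int × Int) :=
  let allT := PySem.Set.add st.2 (pySort3 v.1 v.2.1 v.2.2)
  let d := (pyCycle v.1 v.2.1 v.2.2).foldl (fun d e => d.modify e 0 (· + 1)) st.1
  (d, allT)

def filter_problem_triangles_alt (vertices : List (Int × Int × Int)) : List (Int × Int × Int) :=
  let st := vertices.foldl pvStepB (PySem.Dict.empty, PySem.Set.empty)
  let problem := st.2.foldl
      (fun pb t => if (pyCycle t.1 t.2.1 t.2.2).any (fun e => decide (2 < st.1.getD e 0)) then pb.add t else pb)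
      PySem.Set.empty
  PySem.Set.diff st.2 problem

-- ===== PRECONDITION & SPEC =====
def Spec_filter_problem_triangles (vertices : List (Int × Int × Int)) (out : List (Int × Int × Int)) : Prop := out = filter_problem_triangles_alt vertices
instance (vertices : List (Int × Int × Int)) (out : List (Int × Int × Int)) : Decidable (Spec_filter_problem_triangles vertices out) := by unfold Spec_filter_problem_triangles; infer_instance

-- ===== CLAIM (what is proved, stated in full; the proofs are below) =====
def Claim_equal_filter_problem_triangles : Prop := ∀ (vertices : List (Int × Int × Int)), Dom_filter_problem_triangles vertices → Spec_filter_problem_triangles vertices (filter_problem_triangles vertices)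

-- ===== LEMMAS AND PROOFS =====

theorem pySortPair_eq (i j : Int) : pySortPair i j = if j < i then (j, i) else (i, j) := by
  unfold pySortPair
  rw [PySem.List.sorted_eq_foldl_insertBy]
  simp only [List.foldl, PySem.List.insertBy]
  split_ifs <;> simp_all

theorem pySortPair_comm (i j : Int) : pySortPair i j = pySortPair j i := by
  rw [pySortPair_eq, pySortPair_eq]
  split_ifs <;> (first | rfl | omega | (simp_all; omega))

-- the three sorted edges of a triangle depend only on the multiset {i, j, k}
theorem mem_cycle_sort3 (i j k : Int) (e : Int × Int) :
    e ∈ pyCycle (pySort3 i j k).1 (pySort3 i j k).2.1 (pySort3 i j k).2.2 ↔ e ∈ pyCycle i j k := by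
  unfold pySort3
  rw [PySem.List.sorted_eq_foldl_insertBy]
  simp only [List.foldl, PySem.List.insertBy]
  split_ifs <;> simp only [PySem.List.insertBy] <;> split_ifs <;>
    (simp only [pyCycle, List.mem_cons, List.not_mem_nil, or_false,
      pySortPair_comm j i, pySortPair_comm k i, pySortPair_comm k j]
     try tauto)

-- A's loop body, with the paired inner fold split into its two components
theorem stepA_eq (d : PySem.Dict (Int × Int) Int) (e2t : PySem.Dict (Int × Int) (List (Int × Int × Int)))
    (allT : PySem.Set (Int × Int × Int)) (v : Int × Int × Int) :
    pvStepA (d, e2t, allT) v =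
      ((pyCycle v.1 v.2.1 v.2.2).foldl (fun m e => m.modify e 0 (· + 1)) d,
       (pyCycle v.1 v.2.1 v.2.2).foldl
         (fun m e => m.modify e [] (fun l => l ++ [pySort3 v.1 v.2.1 v.2.2])) e2t,
       PySem.Set.add allT (pySort3 v.1 v.2.1 v.2.2)) := rfl

theorem stepB_eq (d : PySem.Dict (Int × Int) Int) (allT : PySem.Set (Int × Int × Int)) (v : Int × Int × Int) :
    pvStepB (d, allT) v =
      ((pyCycle v.1 v.2.1 v.2.2).foldl (fun m e => m.modify e 0 (· + 1)) d,
       PySem.Set.add allT (pySort3 v.1 v.2.1 v.2.2)) := rfl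

-- B's first loop is the (d, all_triangles) projection of A's
theorem foldB_proj : ∀ (vs : List (Int × Int × Int)) d e2t allT,
    vs.foldl pvStepB (d, allT) =
      ((vs.foldl pvStepA (d, e2t, allT)).1, (vs.foldl pvStepA (d, e2t, allT)).2.2) := by
  intro vs
  induction vs with
  | nil => intro d e2t allT; rfl
  | cons v tl ih =>
    intro d e2t allT
    simp only [List.foldl]
    rw [stepA_eq, stepB_eq]
    exact ih _ _ _

-- membership in edge_to_triangles after one triangle's inner loop
theorem e2t_step_mem (ijk : Int × Int × Int) (c : Int × Int) (t : Int × Int × Int) :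
    ∀ (edges : List (Int × Int)) (e2t : PySem.Dict (Int × Int) (List (Int × Int × Int))),
    t ∈ (edges.foldl (fun m e => m.modify e [] (fun l => l ++ [ijk])) e2t).getD c [] ↔
      t ∈ e2t.getD c [] ∨ (c ∈ edges ∧ t = ijk) := by
  intro edges
  induction edges with
  | nil => intro e2t; simp
  | cons a tl ih =>
    intro e2t
    simp only [List.foldl]
    rw [ih, PySem.Dict.getD_modify]
    split_ifs with hca
    · subst hca
      simp only [List.mem_append, List.mem_cons]
      tauto
    · simp only [List.mem_cons]
      tauto

-- main invariant of A's first loop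
theorem invA : ∀ (vs : List (Int × Int × Int)) d e2t allT,
    d.keys.Nodup →
    (∀ (e : Int × Int) (t : Int × Int × Int),
        t ∈ e2t.getD e [] ↔ t ∈ allT ∧ e ∈ pyCycle t.1 t.2.1 t.2.2) →
    ((vs.foldl pvStepA (d, e2t, allT)).1.keys.Nodup ∧
      ∀ (e : Int × Int) (t : Int × Int × Int),
        t ∈ (vs.foldl pvStepA (d, e2t, allT)).2.1.getD e [] ↔
          t ∈ (vs.foldl pvStepA (d, e2t, allT)).2.2 ∧ e ∈ pyCycle t.1 t.2.1 t.2.2) := by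
  intro vs
  induction vs with
  | nil => intro d e2t allT hnd hin; exact ⟨hnd, hin⟩
  | cons v tl ih =>
    intro d e2t allT hnd hin
    simp only [List.foldl]
    rw [stepA_eq]
    apply ih
    · exact PySem.Dict.nodup_keys_foldl_modify_key _ (fun x => x) 0 (fun _ _ => (· + 1)) d hnd
    · intro e t
      rw [e2t_step_mem]
      rw [hin e t]
      simp only [PySem.Set.mem_add]
      constructor
      · rintro (⟨ht, he⟩ | ⟨he, rfl⟩)
        · exact ⟨Or.inl ht, he⟩
        · exact ⟨Or.inr rfl, (mem_cycle_sort3 v.1 v.2.1 v.2.2 e).mpr he⟩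
      · rintro ⟨ht | rfl, he⟩
        · exact Or.inl ⟨ht, he⟩
        · exact Or.inr ⟨(mem_cycle_sort3 v.1 v.2.1 v.2.2 e).mp he, rfl⟩

-- membership in A's problem_triangles set
theorem memPA (e2t : PySem.Dict (Int × Int) (List (Int × Int × Int))) :
    ∀ (items : List ((Int × Int) × Int)) (pb : PySem.Set (Int × Int × Int)) (t : Int × Int × Int),
    t ∈ items.foldl
        (fun pb kv => if kv.2 > 2 then (e2t.getD kv.1 []).foldl (fun pb t => pb.add t) pb else pb) pb ↔
      t ∈ pb ∨ ∃ p ∈ items, p.2 > 2 ∧ t ∈ e2t.getD p.1 [] := by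
  intro items
  induction items with
  | nil => intro pb t; simp
  | cons kv tl ih =>
    intro pb t
    simp only [List.foldl]
    by_cases h : kv.2 > 2
    · rw [if_pos h, ih]
      have hadd : t ∈ (e2t.getD kv.1 []).foldl (fun pb t => pb.add t) pb ↔
          t ∈ pb ∨ t ∈ e2t.getD kv.1 [] := by
        rw [PySem.Set.mem_foldl_add _ (fun x => x)]
        simp
      rw [hadd]
      simp only [List.mem_cons]
      constructor
      · rintro ((h1 | h1) | ⟨p, hp, h2, h3⟩)
        · exact Or.inl h1
        · exact Or.inr ⟨kv, Or.inl rfl, h, h1⟩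
        · exact Or.inr ⟨p, Or.inr hp, h2, h3⟩
      · rintro (h1 | ⟨p, hp | hp, h2, h3⟩)
        · exact Or.inl (Or.inl h1)
        · subst hp; exact Or.inl (Or.inr h3)
        · exact Or.inr ⟨p, hp, h2, h3⟩
    · rw [if_neg h, ih]
      simp only [List.mem_cons]
      constructor
      · rintro (h1 | ⟨p, hp, h2, h3⟩)
        · exact Or.inl h1
        · exact Or.inr ⟨p, Or.inr hp, h2, h3⟩
      · rintro (h1 | ⟨p, hp | hp, h2, h3⟩)
        · exact Or.inl h1
        · subst hp; exact absurd h2 h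
        · exact Or.inr ⟨p, hp, h2, h3⟩

-- membership in B's problem_triangles set
theorem memPB (d : PySem.Dict (Int × Int) Int) :
    ∀ (allT : List (Int × Int × Int)) (pb : PySem.Set (Int × Int × Int)) (t : Int × Int × Int),
    t ∈ allT.foldl
        (fun pb t => if (pyCycle t.1 t.2.1 t.2.2).any (fun e => decide (2 < d.getD e 0)) then pb.add t else pb) pb ↔
      t ∈ pb ∨ (t ∈ allT ∧ ∃ e ∈ pyCycle t.1 t.2.1 t.2.2, 2 < d.getD e 0) := by
  intro allT
  induction allT with
  | nil => intro pb t; simp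
  | cons u tl ih =>
    intro pb t
    simp only [List.foldl]
    by_cases h : (pyCycle u.1 u.2.1 u.2.2).any (fun e => decide (2 < d.getD e 0)) = true
    · rw [if_pos h, ih]
      simp only [PySem.Set.mem_add, List.mem_cons]
      have hu : ∃ e ∈ pyCycle u.1 u.2.1 u.2.2, 2 < d.getD e 0 := by
        simpa [List.any_eq_true] using h
      constructor
      · rintro ((h1 | rfl) | ⟨h1, h2⟩)
        · exact Or.inl h1
        · exact Or.inr ⟨Or.inl rfl, hu⟩
        · exact Or.inr ⟨Or.inr h1, h2⟩
      · rintro (h1 | ⟨rfl | h1, h2⟩)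
        · exact Or.inl (Or.inl h1)
        · exact Or.inl (Or.inr rfl)
        · exact Or.inr ⟨h1, h2⟩
    · rw [if_neg h, ih]
      simp only [List.mem_cons]
      have hu : ¬ ∃ e ∈ pyCycle u.1 u.2.1 u.2.2, 2 < d.getD e 0 := by
        simpa [List.any_eq_true] using h
      constructor
      · rintro (h1 | ⟨h1, h2⟩)
        · exact Or.inl h1
        · exact Or.inr ⟨Or.inr h1, h2⟩
      · rintro (h1 | ⟨rfl | h1, h2⟩)
        · exact Or.inl h1
        · exact absurd h2 hu
        · exact Or.inr ⟨h1, h2⟩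

theorem diff_congr (s p q : PySem.Set (Int × Int × Int))
    (h : ∀ x ∈ s, (x ∈ p ↔ x ∈ q)) : PySem.Set.diff s p = PySem.Set.diff s q := by
  simp only [PySem.Set.diff]
  apply List.filter_congr
  intro x hx
  simp [h x hx]

-- items with count > 2 ↔ some edge with count > 2 (keys unique)
theorem items_getD (d : PySem.Dict (Int × Int) Int) (hnd : d.keys.Nodup)
    (P : (Int × Int) → Prop) :
    (∃ p ∈ d.items, p.2 > 2 ∧ P p.1) ↔ ∃ e, 2 < d.getD e 0 ∧ P e := by
  constructor
  · rintro ⟨⟨k, v⟩, hp, h2, hP⟩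
    exact ⟨k, by rw [PySem.Dict.getD_of_mem_items d hp hnd 0]; exact h2, hP⟩
  · rintro ⟨e, h2, hP⟩
    rw [PySem.Dict.getD_eq_get?_getD] at h2
    cases hg : d.get? e with
    | none => rw [hg] at h2; simp at h2
    | some v =>
      rw [hg] at h2
      exact ⟨(e, v), PySem.Dict.mem_items_of_get?_eq_some d hg, h2, hP⟩

-- ===== VERDICT (by name: the statement is the Claim_ definition above) =====
theorem filter_problem_triangles_spec : Claim_equal_filter_problem_triangles := by
  intro vertices _
  unfold Spec_filter_problem_triangles filter_problem_triangles filter_problem_triangles_alt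
  simp only
  rw [foldB_proj vertices PySem.Dict.empty PySem.Dict.empty PySem.Set.empty]
  have hinv := invA vertices PySem.Dict.empty PySem.Dict.empty PySem.Set.empty
    (by simp [PySem.Dict.keys_empty])
    (by intro e t; simp [PySem.Dict.getD_empty, PySem.Set.empty])
  set s := vertices.foldl pvStepA (PySem.Dict.empty, PySem.Dict.empty, PySem.Set.empty) with hs
  apply diff_congr
  intro t ht
  rw [memPA, memPB]
  have hemp : ∀ u : Int × Int × Int, u ∈ (PySem.Set.empty : PySem.Set (Int × Int × Int)) ↔ False := by
    intro u; simp [PySem.Set.empty]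
  simp only [hemp, false_or]
  rw [items_getD s.1 hinv.1 (fun e => t ∈ s.2.1.getD e [])]
  constructor
  · rintro ⟨e, h2, hmem⟩
    rw [hinv.2 e t] at hmem
    exact ⟨hmem.1, e, hmem.2, h2⟩
  · rintro ⟨_, e, he, h2⟩
    exact ⟨e, h2, (hinv.2 e t).mpr ⟨ht, he⟩⟩
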